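-- pv_equiv track=rewrite | github.com/nurnisi/algorithms-and-data-structures | other/12-google-practice.py | decreasing_subsequences2
-- ===== SOURCE A (Python) =====
-- def decreasing_subsequences2(A):
--     subs = []
--     for x in A:
--         appended = False
--         for i in range(len(subs)):
--             if subs[i] > x:
--                 subs[i] = x
--                 appended = True
--                 break
--         if not appended:
--             subs.append(x)
--
--     return len(subs)
--
-- A = [1, 1, 1]
-- ===== SOURCE B (Python) =====
-- def decreasing_subsequences2(A):
--     subs = []  # invariant: subs stays sorted nondecreasing
--     for x in A:
--         lo, hi = 0, len(subs)
--         while lo < hi:  # hand-written bisect_right: first index with subs[i] > x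
--             mid = (lo + hi) // 2
--             if subs[mid] > x:
--                 hi = mid
--             else:
--                 lo = mid + 1
--         if lo == len(subs):
--             subs.append(x)
--         else:
--             subs[lo] = x
--     return len(subs)
-- ===== Notes on version B (the rewrite author's own statement) =====
-- stated objective: faster
-- what changed: The pile-tops list subs is always sorted nondecreasing, so B replaces A's inner linear scan with a hand-written binary search (bisect_right) locating the first pile top > x.
import Mathlib
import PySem

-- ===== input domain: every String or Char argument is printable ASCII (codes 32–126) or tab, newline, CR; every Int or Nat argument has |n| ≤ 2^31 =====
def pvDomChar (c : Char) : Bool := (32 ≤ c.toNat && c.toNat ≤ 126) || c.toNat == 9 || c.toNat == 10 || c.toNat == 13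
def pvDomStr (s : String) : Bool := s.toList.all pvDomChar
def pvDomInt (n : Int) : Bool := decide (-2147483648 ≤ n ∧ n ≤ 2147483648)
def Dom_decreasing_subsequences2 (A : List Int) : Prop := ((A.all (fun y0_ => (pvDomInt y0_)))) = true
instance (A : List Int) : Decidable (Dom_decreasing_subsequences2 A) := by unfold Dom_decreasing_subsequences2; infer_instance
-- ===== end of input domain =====

-- B replaces A's inner linear scan over the pile tops (which stay sorted) by a binary search; equal return value proved for all inputs.

-- ===== PORT A =====
-- inner 'for i in range(len(subs)): if subs[i] > x: subs[i] = x; appended = True; break'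
-- as a structural scan returning (new subs, appended flag)
def pyInnerA (x : Int) : List Int → List Int × Bool
  | [] => ([], false)
  | y :: rest =>
    if y > x then (x :: rest, true)
    else
      let (r, b) := pyInnerA x rest
      (y :: r, b)

def aStep (subs : List Int) (x : Int) : List Int :=
  let (s, appended) := pyInnerA x subs
  if appended then s else s ++ [x]

def decreasing_subsequences2 (A : List Int) : Int :=
  (A.foldl aStep []).length

-- ===== PORT B =====
-- hand-written bisect_right from Source B: while lo < hi: mid = (lo+hi)//2; ...
-- (subs.getD mid 0 is exact: 0 ≤ lo ≤ mid < hi ≤ len subs at every access)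
-- while-loop ported with fuel = hi - lo (each iteration strictly shrinks hi - lo, so the fuel suffices)
def bisectRFuel : Nat → List Int → Int → Nat → Nat → Nat
  | 0, _, _, lo, _ => lo
  | n + 1, subs, x, lo, hi =>
    if lo < hi then
      let mid := (lo + hi) / 2
      if subs.getD mid 0 > x then bisectRFuel n subs x lo mid
      else bisectRFuel n subs x (mid + 1) hi
    else lo

def bisectR (subs : List Int) (x : Int) (lo hi : Nat) : Nat :=
  bisectRFuel (hi - lo) subs x lo hi

def bStep (subs : List Int) (x : Int) : List Int :=
  let j := bisectR subs x 0 subs.length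
  if j = subs.length then subs ++ [x] else subs.set j x

def decreasing_subsequences2_alt (A : List Int) : Int :=
  (A.foldl bStep []).length

-- ===== PRECONDITION & SPEC =====
def Spec_decreasing_subsequences2 (A : List Int) (out : Int) : Prop := out = decreasing_subsequences2_alt A
instance (A : List Int) (out : Int) : Decidable (Spec_decreasing_subsequences2 A out) := by unfold Spec_decreasing_subsequences2; infer_instance

-- ===== CLAIM (what is proved, stated in full; the proofs are below) =====
def Claim_equal_decreasing_subsequences2 : Prop := ∀ (A : List Int), Dom_decreasing_subsequences2 A → Spec_decreasing_subsequences2 A (decreasing_subsequences2 A)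

-- ===== LEMMAS AND PROOFS =====

-- the index of the first element > x (or length), as a linear scan
def fgt (x : Int) : List Int → Nat
  | [] => 0
  | y :: rest => if y > x then 0 else fgt x rest + 1

-- characterization of "first index with element > x"
def PredIdx (subs : List Int) (x : Int) (j : Nat) : Prop :=
  j ≤ subs.length ∧ (∀ k, k < j → subs.getD k 0 ≤ x) ∧ (j < subs.length → x < subs.getD j 0)

-- sortedness (nondecreasing) via getD
def Mono (l : List Int) : Prop :=
  ∀ i j : Nat, i ≤ j → j < l.length → l.getD i 0 ≤ l.getD j 0

lemma fgt_pred (x : Int) (subs : List Int) : PredIdx subs x (fgt x subs) := by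
  induction subs with
  | nil => exact ⟨Nat.le_refl _, by intro k hk; simp [fgt] at hk, by intro h; simp at h⟩
  | cons y rest ih =>
    by_cases hy : y > x
    · refine ⟨by simp [fgt, hy], by intro k hk; simp [fgt, hy] at hk, ?_⟩
      intro _; simp [fgt, hy]
    · obtain ⟨h1, h2, h3⟩ := ih
      refine ⟨by simp [fgt, hy]; omega, ?_, ?_⟩
      · intro k hk
        cases k with
        | zero => simpa using le_of_not_gt hy
        | succ k' =>
          simp only [List.getD_cons_succ]
          exact h2 k' (by simp [fgt, hy] at hk; omega)
      · intro hlt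
        simp only [fgt, hy, if_false, List.getD_cons_succ]
        exact h3 (by simpa [fgt, hy] using hlt)

lemma pred_unique {subs : List Int} {x : Int} {j1 j2 : Nat}
    (h1 : PredIdx subs x j1) (h2 : PredIdx subs x j2) : j1 = j2 := by
  obtain ⟨a1, b1, c1⟩ := h1
  obtain ⟨a2, b2, c2⟩ := h2
  rcases Nat.lt_trichotomy j1 j2 with h | h | h
  · have := b2 j1 h
    have := c1 (by omega)
    omega
  · exact h
  · have := b1 j2 h
    have := c2 (by omega)
    omega

lemma bisectR_pred (subs : List Int) (x : Int) (hm : Mono subs) :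
    ∀ n lo hi, hi - lo ≤ n → lo ≤ hi → hi ≤ subs.length →
    (∀ k, k < lo → subs.getD k 0 ≤ x) →
    (∀ k, hi ≤ k → k < subs.length → x < subs.getD k 0) →
    PredIdx subs x (bisectRFuel n subs x lo hi) := by
  intro n
  induction n with
  | zero =>
    intro lo hi hn hle hlen hlo hhi
    have heq : lo = hi := by omega
    subst heq
    simp only [bisectRFuel]
    exact ⟨hlen, hlo, fun h => hhi lo (Nat.le_refl _) h⟩
  | succ n ih =>
    intro lo hi hn hle hlen hlo hhi
    simp only [bisectRFuel]
    by_cases h : lo < hi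
    · simp only [h, if_true]
      set mid := (lo + hi) / 2 with hmid
      have hml : lo ≤ mid := by omega
      have hmh : mid < hi := by omega
      by_cases hc : subs.getD mid 0 > x
      · simp only [hc, if_true]
        refine ih lo mid (by omega) (by omega) (by omega) hlo ?_
        intro k hk hkl
        exact lt_of_lt_of_le hc (hm mid k hk hkl)
      · simp only [hc, if_false]
        refine ih (mid + 1) hi (by omega) (by omega) hlen ?_ hhi
        intro k hk
        exact le_trans (hm k mid (by omega) (by omega)) (le_of_not_gt hc)
    · simp only [h, if_false]
      have : lo = hi := by omega
      subst this
      exact ⟨by omega, hlo, fun hl => hhi lo (Nat.le_refl _) hl⟩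

lemma bisectR_eq_fgt (subs : List Int) (x : Int) (hm : Mono subs) :
    bisectR subs x 0 subs.length = fgt x subs :=
  pred_unique
    (bisectR_pred subs x hm (subs.length - 0) 0 subs.length (by omega) (by omega) (le_refl _)
      (by intro k hk; omega) (by intro k hk hkl; omega))
    (fgt_pred x subs)

-- A's inner scan in set/replace form, via fgt
lemma pyInnerA_spec (x : Int) (rest : List Int) :
    pyInnerA x rest =
      if fgt x rest = rest.length then (rest, false)
      else (rest.set (fgt x rest) x, true) := by
  induction rest with
  | nil => simp [pyInnerA, fgt]
  | cons y zs ih =>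
    by_cases hy : y > x
    · simp [pyInnerA, fgt, hy]
    · simp only [pyInnerA, hy, if_false, fgt, List.length_cons]
      rw [ih]
      by_cases hz : fgt x zs = zs.length
      · simp [hz]
      · simp [hz]

-- A's step in set/append form, via fgt
lemma aStep_eq (x : Int) (subs : List Int) :
    aStep subs x = if fgt x subs = subs.length then subs ++ [x] else subs.set (fgt x subs) x := by
  rw [aStep, pyInnerA_spec]
  by_cases h : fgt x subs = subs.length <;> simp [h]

lemma getD_append_lt (l : List Int) (x : Int) (i : Nat) (h : i < l.length) :
    (l ++ [x]).getD i 0 = l.getD i 0 := by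
  simp [List.getD_eq_getElem?_getD, List.getElem?_append_left h]

lemma getD_append_self (l : List Int) (x : Int) :
    (l ++ [x]).getD l.length 0 = x := by
  simp [List.getD_eq_getElem?_getD]

lemma getD_set (l : List Int) (j i : Nat) (x : Int) (hi : i < l.length) :
    (l.set j x).getD i 0 = if j = i then x else l.getD i 0 := by
  rcases eq_or_ne j i with rfl | hne
  · simp [List.getD_eq_getElem?_getD, hi]
  · simp [List.getD_eq_getElem?_getD, hne]

lemma mono_step (x : Int) (subs : List Int) (hm : Mono subs) : Mono (aStep subs x) := by
  rw [aStep_eq]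
  obtain ⟨hle, hsmall, hbig⟩ := fgt_pred x subs
  by_cases h : fgt x subs = subs.length
  · simp only [h, if_true]
    intro i j hij hj
    simp only [List.length_append, List.length_cons, List.length_nil] at hj
    by_cases hjl : j < subs.length
    · rw [getD_append_lt _ _ _ hjl, getD_append_lt _ _ _ (by omega)]
      exact hm i j hij hjl
    · have hj' : j = subs.length := by omega
      subst hj'
      rw [getD_append_self]
      by_cases hil : i < subs.length
      · rw [getD_append_lt _ _ _ hil]
        exact hsmall i (by omega)
      · have : i = subs.length := by omega
        subst this
        rw [getD_append_self]
  · simp only [h, if_false]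
    have hjl : fgt x subs < subs.length := by omega
    intro i j hij hj
    simp only [List.length_set] at hj
    rw [getD_set _ _ _ _ hj, getD_set _ _ _ _ (by omega)]
    by_cases h1 : fgt x subs = i
    · by_cases h2 : fgt x subs = j
      · rw [if_pos h1, if_pos h2]
      · rw [if_pos h1, if_neg h2]
        exact le_trans (le_of_lt (hbig hjl)) (hm (fgt x subs) j (by omega) hj)
    · by_cases h2 : fgt x subs = j
      · rw [if_neg h1, if_pos h2]
        exact hsmall i (by omega)
      · rw [if_neg h1, if_neg h2]
        exact hm i j hij hj

lemma step_eq (x : Int) (subs : List Int) (hm : Mono subs) : aStep subs x = bStep subs x := by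
  rw [aStep_eq, bStep, bisectR_eq_fgt subs x hm]

lemma foldl_eq (A : List Int) : ∀ subs, Mono subs →
    A.foldl aStep subs = A.foldl bStep subs := by
  induction A with
  | nil => intro subs _; rfl
  | cons x rest ih =>
    intro subs hm
    simp only [List.foldl_cons]
    rw [← step_eq x subs hm]
    exact ih _ (mono_step x subs hm)

-- ===== VERDICT (by name: the statement is the Claim_ definition above) =====
theorem decreasing_subsequences2_spec : Claim_equal_decreasing_subsequences2 := by
  intro A _
  unfold Spec_decreasing_subsequences2 decreasing_subsequences2 decreasing_subsequences2_alt
  rw [foldl_eq A [] (by intro i j _ hj; simp at hj)]
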